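-- pv_equiv track=rewrite | github.com/miekeida/phd_programming | basis_c_flat_functions.py | inkl_min_listen
-- ===== SOURCE A (Python) =====
-- def inkl_min_listen(liste_von_listen):
--     minimal_listen = []
--     for liste in liste_von_listen:
--         ist_minimal = True
--         for andere_liste in liste_von_listen:
--             if set(andere_liste).issubset(set(liste)) and len(andere_liste) < len(liste):
--                 ist_minimal = False
--                 break
--         if ist_minimal:
--             minimal_listen.append(liste)
--     return minimal_listen
-- ===== SOURCE B (Python) =====
-- def inkl_min_listen(liste_von_listen):
--     # length-ordered pass: sort records by list length, so a dominating
--     # strictly-shorter list is always among the already-seen records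
--     records = sorted(
--         [(i, set(l), len(l), l) for i, l in enumerate(liste_von_listen)],
--         key=lambda r: r[2],
--     )
--     seen = []
--     survivors = []
--     for rec in records:
--         if not any(s[2] < rec[2] and s[1].issubset(rec[1]) for s in seen):
--             survivors.append(rec)
--         seen.append(rec)
--     survivors.sort(key=lambda r: r[0])
--     return [r[3] for r in survivors]
-- ===== Notes on version B (the rewrite author's own statement) =====
-- stated objective: faster
-- what changed: Replaces the all-pairs scan (which rebuilds set(l) for both lists inside the inner loop) by a length-sorted sweep: each list's set and length are computed once, records sorted by length are walked once, each checked only against already-seen records with strictly smaller length, and survivors are sorted back to original order by index.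
import Mathlib
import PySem

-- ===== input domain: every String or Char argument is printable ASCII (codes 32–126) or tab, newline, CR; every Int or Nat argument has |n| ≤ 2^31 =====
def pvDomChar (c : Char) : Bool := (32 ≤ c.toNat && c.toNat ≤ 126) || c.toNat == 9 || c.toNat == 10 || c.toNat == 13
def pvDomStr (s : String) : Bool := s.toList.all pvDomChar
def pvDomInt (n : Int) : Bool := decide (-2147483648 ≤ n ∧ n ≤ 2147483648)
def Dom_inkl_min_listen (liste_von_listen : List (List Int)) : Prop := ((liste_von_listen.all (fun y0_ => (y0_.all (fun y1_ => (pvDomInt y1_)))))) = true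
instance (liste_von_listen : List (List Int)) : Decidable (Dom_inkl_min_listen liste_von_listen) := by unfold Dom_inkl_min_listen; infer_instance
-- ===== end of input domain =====

-- B replaces A's all-pairs scan by a length-sorted sweep that compares each record
-- only against already-seen (shorter-or-equal) records, then restores input order.

-- ===== PORT A =====
-- inner 'for andere_liste …: if …: ist_minimal = False; break'
def pvIstMinimal (alle : List (List Int)) (liste : List Int) : Bool :=
  match alle with
  | [] => true
  | andere :: rest =>
    if PySem.Set.issubset (PySem.Set.ofList andere) (PySem.Set.ofList liste)
        && decide (andere.length < liste.length) then false
    else pvIstMinimal rest liste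

def inkl_min_listen (liste_von_listen : List (List Int)) : List (List Int) :=
  liste_von_listen.foldl
    (fun minimal_listen liste =>
      if pvIstMinimal liste_von_listen liste then minimal_listen ++ [liste]
      else minimal_listen)
    []

-- ===== PORT B =====
-- 'any(s[2] < rec[2] and s[1].issubset(rec[1]) for s in seen)'
def pvCheckSeen (seen : List (Int × PySem.Set Int × Int × List Int))
    (rec : Int × PySem.Set Int × Int × List Int) : Bool :=
  seen.any (fun s => s.2.2.1 < rec.2.2.1 && PySem.Set.issubset s.2.1 rec.2.1)

def inkl_min_listen_alt (liste_von_listen : List (List Int)) : List (List Int) :=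
  let records := PySem.List.sorted
    ((PySem.List.enumerate liste_von_listen).map
      (fun p => (p.1, (PySem.Set.ofList p.2, ((p.2.length : Int), p.2)))))
    (fun r => r.2.2.1)
  let st := records.foldl
    (fun st r =>
      if pvCheckSeen st.2 r then (st.1, st.2 ++ [r])
      else (st.1 ++ [r], st.2 ++ [r]))
    ([], [])
  (PySem.List.sorted st.1 (fun r => r.1)).map (fun r => r.2.2.2)

-- ===== PRECONDITION & SPEC =====
def Spec_inkl_min_listen (liste_von_listen : List (List Int)) (out : List (List Int)) : Prop := out = inkl_min_listen_alt liste_von_listen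
instance (liste_von_listen : List (List Int)) (out : List (List Int)) : Decidable (Spec_inkl_min_listen liste_von_listen out) := by unfold Spec_inkl_min_listen; infer_instance

-- ===== CLAIM (what is proved, stated in full; the proofs are below) =====
def Claim_equal_inkl_min_listen : Prop := ∀ (liste_von_listen : List (List Int)), Dom_inkl_min_listen liste_von_listen → Spec_inkl_min_listen liste_von_listen (inkl_min_listen liste_von_listen)

-- ===== LEMMAS AND PROOFS =====

-- the records B builds, before sorting
def pvRecs (L : List (List Int)) : List (Int × PySem.Set Int × Int × List Int) :=
  (PySem.List.enumerate L).map
    (fun p => (p.1, (PySem.Set.ofList p.2, ((p.2.length : Int), p.2))))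

theorem pvIstMinimal_eq_not_any (alle : List (List Int)) (l : List Int) :
    pvIstMinimal alle l
      = ! alle.any (fun a =>
          PySem.Set.issubset (PySem.Set.ofList a) (PySem.Set.ofList l)
            && decide (a.length < l.length)) := by
  induction alle with
  | nil => rfl
  | cons a rest ih =>
    simp only [pvIstMinimal, List.any_cons]
    by_cases h : (PySem.Set.issubset (PySem.Set.ofList a) (PySem.Set.ofList l)
        && decide (a.length < l.length)) = true
    · simp [h]
    · simp only [Bool.not_eq_true] at h
      simp [h, ih]

theorem pvCheckSeen_perm {xs ys : List (Int × PySem.Set Int × Int × List Int)}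
    (h : xs.Perm ys) (r : Int × PySem.Set Int × Int × List Int) :
    pvCheckSeen xs r = pvCheckSeen ys r := by
  unfold pvCheckSeen
  rw [Bool.eq_iff_iff]
  simp only [List.any_eq_true]
  constructor
  · rintro ⟨s, hs, hp⟩; exact ⟨s, h.mem_iff.mp hs, hp⟩
  · rintro ⟨s, hs, hp⟩; exact ⟨s, h.mem_iff.mpr hs, hp⟩

theorem pvScan (full : List (Int × PySem.Set Int × Int × List Int))
    (hfull : full.Pairwise (fun a b => a.2.2.1 ≤ b.2.2.1)) :
    ∀ (rs pre surv : List (Int × PySem.Set Int × Int × List Int)),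
      pre ++ rs = full →
      rs.foldl (fun st r =>
          if pvCheckSeen st.2 r then (st.1, st.2 ++ [r])
          else (st.1 ++ [r], st.2 ++ [r])) (surv, pre)
        = (surv ++ rs.filter (fun r => ! pvCheckSeen full r), full) := by
  intro rs
  induction rs with
  | nil => intro pre surv h; simpa using h
  | cons r rs ih =>
    intro pre surv h
    have hcheck : pvCheckSeen pre r = pvCheckSeen full r := by
      rw [Bool.eq_iff_iff]
      unfold pvCheckSeen
      simp only [List.any_eq_true]
      constructor
      · rintro ⟨s, hs, hp⟩
        exact ⟨s, h ▸ List.mem_append_left _ hs, hp⟩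
      · rintro ⟨s, hs, hp⟩
        rw [← h] at hs
        rcases List.mem_append.mp hs with hs | hs
        · exact ⟨s, hs, hp⟩
        · exfalso
          have hle : r.2.2.1 ≤ s.2.2.1 := by
            rcases List.mem_cons.mp hs with rfl | hs'
            · exact le_refl _
            · have hp2 := (List.pairwise_append.mp (h ▸ hfull)).2.1
              exact (List.pairwise_cons.mp hp2).1 s hs'
          have hlt := Bool.and_elim_left hp
          simp only [decide_eq_true_eq] at hlt
          omega
    simp only [List.foldl_cons, List.filter_cons, hcheck]
    by_cases hb : pvCheckSeen full r = true
    · rw [if_pos hb, if_neg (by simp [hb]),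
        ih (pre ++ [r]) surv (by simpa using h)]
    · have hb' : pvCheckSeen full r = false := by simpa using hb
      rw [if_neg hb, if_pos (by simp [hb']),
        ih (pre ++ [r]) (surv ++ [r]) (by simpa using h)]
      simp

theorem pvAny_enumerate (c : List Int → Bool) :
    ∀ (L : List (List Int)) (s : Int),
      (PySem.List.enumerate L s).any (fun p => c p.2) = L.any c := by
  intro L
  induction L with
  | nil => intro s; simp [PySem.List.enumerate_nil]
  | cons x xs ih => intro s; simp [PySem.List.enumerate_cons, ih]

theorem pvPush (P : List Int → Bool) :
    ∀ (L : List (List Int)) (s : Int),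
      (((PySem.List.enumerate L s).map
          (fun p => (p.1, (PySem.Set.ofList p.2, ((p.2.length : Int), p.2))))).filter
          (fun r => P r.2.2.2)).map (fun r => r.2.2.2)
        = L.filter P := by
  intro L
  induction L with
  | nil => intro s; simp [PySem.List.enumerate_nil]
  | cons x xs ih =>
    intro s
    simp only [PySem.List.enumerate_cons, List.map_cons, List.filter_cons]
    by_cases h : P x = true
    · simp [h, ih]
    · simp only [Bool.not_eq_true] at h
      simp [h, ih]

theorem inkl_min_listen_spec' (L : List (List Int)) :
    inkl_min_listen L = inkl_min_listen_alt L := by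
  -- A side: filter by pvIstMinimal
  have hA : inkl_min_listen L = L.filter (fun l => pvIstMinimal L l) := by
    unfold inkl_min_listen
    rw [PySem.List.foldl_append_if_eq_filter]
    simp
  -- B side
  unfold inkl_min_listen_alt
  simp only []
  set key : (Int × PySem.Set Int × Int × List Int) → Int := fun r => r.2.2.1 with hkey
  have hrecs : (PySem.List.enumerate L).map
      (fun p => (p.1, (PySem.Set.ofList p.2, ((p.2.length : Int), p.2)))) = pvRecs L := rfl
  rw [hrecs]
  set records := PySem.List.sorted (pvRecs L) key with hrecords
  have hperm : records.Perm (pvRecs L) := PySem.List.sorted_perm _ _ _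
  have hpw : records.Pairwise (fun a b => a.2.2.1 ≤ b.2.2.1) :=
    PySem.List.sorted_pairwise (pvRecs L) key
  have hscan := pvScan records hpw records [] [] rfl
  rw [hscan]
  simp only [List.nil_append]
  -- the filter predicate over records equals a predicate of the carried list
  have hfilter : records.filter (fun r => ! pvCheckSeen records r)
      = records.filter (fun r => pvIstMinimal L r.2.2.2) := by
    apply List.filter_congr
    intro r hr
    have hr' : r ∈ pvRecs L := hperm.mem_iff.mp hr
    rcases List.mem_map.mp hr' with ⟨p, hp, rfl⟩
    simp only []
    rw [pvCheckSeen_perm hperm, pvIstMinimal_eq_not_any]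
    congr 1
    unfold pvCheckSeen pvRecs
    have h1 := pvAny_enumerate (fun a =>
      decide ((a.length : Int) < (p.2.length : Int))
        && PySem.Set.issubset (PySem.Set.ofList a) (PySem.Set.ofList p.2)) L 0
    simp only [List.any_map, Function.comp_def]
    rw [h1]
    apply List.any_congr rfl
    intro a
    rw [Bool.and_comm]
    simp [Nat.cast_lt]
  rw [hfilter]
  -- sort the survivors back by index
  have hbase : (pvRecs L).Pairwise (fun a b => a.1 < b.1) := by
    unfold pvRecs
    exact (PySem.List.pairwise_lt_enumerate L 0).map _ (fun a b h => h)
  have hpw2 : ((pvRecs L).filter (fun r => pvIstMinimal L r.2.2.2)).Pairwise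
      (fun a b => a.1 < b.1) := List.Pairwise.sublist List.filter_sublist hbase
  have hperm2 : ((pvRecs L).filter (fun r => pvIstMinimal L r.2.2.2)).Perm
      (records.filter (fun r => pvIstMinimal L r.2.2.2)) :=
    (hperm.filter _).symm
  rw [PySem.List.sorted_eq_of_perm_of_pairwise_lt _ _ (fun r => r.1) hperm2 hpw2]
  rw [hA]
  exact (pvPush (fun l => pvIstMinimal L l) L 0).symm

-- ===== VERDICT (by name: the statement is the Claim_ definition above) =====
theorem inkl_min_listen_spec : Claim_equal_inkl_min_listen := by
  intro L _
  unfold Spec_inkl_min_listen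
  exact inkl_min_listen_spec' L
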